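-- pv_equiv track=rewrite | github.com/ShreyPatel4/solution_SnowConvertAI_final | snowconvert/make_loadable.py | _upper_unquoted_identifier
-- ===== SOURCE A (Python) =====
-- def _upper_unquoted_identifier(name: str) -> str:
--     """Uppercase identifier segments that are NOT double-quoted.
--
--     'Planning.usp_Foo' -> 'PLANNING.USP_FOO'
--     '"Planning".usp_Foo' -> '"Planning".USP_FOO'   (quoted part preserved)
--     """
--     out = []
--     in_quote = False
--     buf = ""
--     for c in name:
--         if c == '"':
--             if in_quote:
--                 # closing quote — emit preserved
--                 buf += c
--                 out.append(buf)
--                 buf = ""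
--                 in_quote = False
--             else:
--                 # opening quote — flush buf (unquoted, so upper) and start preserving
--                 out.append(buf.upper())
--                 buf = c
--                 in_quote = True
--         else:
--             buf += c
--     if in_quote:
--         # Unterminated quote — leave as-is to avoid corrupting the output
--         out.append(buf)
--     else:
--         out.append(buf.upper())
--     return "".join(out)
-- ===== SOURCE B (Python) =====
-- def _upper_unquoted_identifier(name: str) -> str:
--     parts = name.split('"')
--     return '"'.join(p.upper() if i % 2 == 0 else p for i, p in enumerate(parts))
-- ===== Notes on version B (the rewrite author's own statement) =====
-- stated objective: simpler
-- what changed: Replaced the character-by-character loop with an in_quote flag and buffer by splitting on the double-quote character, uppercasing the even-indexed (unquoted) parts, and joining back; the unterminated-quote case falls out of the index parity automatically.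
import Mathlib
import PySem

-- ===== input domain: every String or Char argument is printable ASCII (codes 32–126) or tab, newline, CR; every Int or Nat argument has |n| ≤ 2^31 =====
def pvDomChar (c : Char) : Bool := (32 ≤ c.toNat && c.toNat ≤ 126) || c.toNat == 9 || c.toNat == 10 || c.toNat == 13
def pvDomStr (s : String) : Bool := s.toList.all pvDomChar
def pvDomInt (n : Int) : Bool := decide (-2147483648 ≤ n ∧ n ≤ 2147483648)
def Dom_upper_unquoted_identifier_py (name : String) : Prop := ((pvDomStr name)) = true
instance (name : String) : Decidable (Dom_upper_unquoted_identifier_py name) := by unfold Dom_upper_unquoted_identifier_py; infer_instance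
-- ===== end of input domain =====

-- B replaces A's character loop (in_quote flag + buffer) by split on '"' + uppercasing
-- the even-indexed parts + join — simpler decomposition, same O(n) cost; return value only.

-- ===== PORT A =====
-- one step of A's for-loop: state = (out, in_quote, buf), with strings kept as List Char
def upperUqStep (st : List (List Char) × Bool × List Char) (c : Char) :
    List (List Char) × Bool × List Char :=
  if c == '"' then
    if st.2.1 then (st.1 ++ [st.2.2 ++ [c]], false, [])
    else (st.1 ++ [PySem.Chars.upper st.2.2], true, [c])
  else (st.1, st.2.1, st.2.2 ++ [c])

def upper_unquoted_identifier_py (name : String) : String :=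
  let st := name.toList.foldl upperUqStep ([], false, [])
  String.mk (PySem.Chars.join []
    (st.1 ++ [if st.2.1 then st.2.2 else PySem.Chars.upper st.2.2]))

-- ===== PORT B =====
def upper_unquoted_identifier_py_alt (name : String) : String :=
  String.mk (PySem.Chars.join ['"']
    ((PySem.List.enumerate (PySem.Chars.splitOn name.toList ['"'])).map
      (fun ip => if ip.1 % 2 == 0 then PySem.Chars.upper ip.2 else ip.2)))

-- ===== PRECONDITION & SPEC =====
def Spec_upper_unquoted_identifier_py (name : String) (out : String) : Prop := out = upper_unquoted_identifier_py_alt name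
instance (name : String) (out : String) : Decidable (Spec_upper_unquoted_identifier_py name out) := by unfold Spec_upper_unquoted_identifier_py; infer_instance

-- ===== CLAIM (what is proved, stated in full; the proofs are below) =====
def Claim_equal_upper_unquoted_identifier_py : Prop := ∀ (name : String), Dom_upper_unquoted_identifier_py name → Spec_upper_unquoted_identifier_py name (upper_unquoted_identifier_py name)

-- ===== LEMMAS AND PROOFS =====

-- common specification: specUQ inq cs = output chars for remaining input cs, flag inq
def specUQ : Bool → List Char → List Char
  | _, [] => []
  | inq, c :: cs =>
      if c == '"' then '"' :: specUQ (!inq) cs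
      else (if inq then c else PySem.Chars.upperChar c) :: specUQ inq cs

-- simple split-on-'"' recursion
def splitQ : List Char → List (List Char)
  | [] => [[]]
  | c :: cs => if c == '"' then [] :: splitQ cs else (splitQ cs).modifyHead (c :: ·)

-- alternate upper/keep over the parts list
def altUQ : Bool → List (List Char) → List (List Char)
  | _, [] => []
  | b, p :: ps => (if b then PySem.Chars.upper p else p) :: altUQ (!b) ps

theorem joinNil_eq_flatten (l : List (List Char)) : PySem.Chars.join [] l = l.flatten := by
  induction l with
  | nil => simp [PySem.Chars.join_nil]
  | cons p ps ih =>
    cases ps with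
    | nil => simp [PySem.Chars.join_singleton]
    | cons q qs => simp [PySem.Chars.join_cons_cons, ih]

-- A-side loop invariant
theorem foldA_spec (cs : List Char) : ∀ (out : List (List Char)) (inq : Bool) (buf : List Char),
    PySem.Chars.join [] ((cs.foldl upperUqStep (out, inq, buf)).1 ++
        [if (cs.foldl upperUqStep (out, inq, buf)).2.1 then (cs.foldl upperUqStep (out, inq, buf)).2.2
         else PySem.Chars.upper (cs.foldl upperUqStep (out, inq, buf)).2.2])
    = out.flatten ++ (if inq then buf else PySem.Chars.upper buf) ++ specUQ inq cs := by
  induction cs with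
  | nil =>
    intro out inq buf
    simp [joinNil_eq_flatten, specUQ]
  | cons c cs ih =>
    intro out inq buf
    by_cases hc : c = '"'
    · subst hc
      cases inq with
      | false =>
        simp only [List.foldl_cons, upperUqStep, if_pos rfl, Bool.false_eq_true, if_false]
        rw [ih]
        simp [specUQ, PySem.Chars.upper]
      | true =>
        simp only [List.foldl_cons, upperUqStep, if_pos rfl, if_pos rfl]
        rw [ih]
        simp [specUQ, PySem.Chars.upper]
    · have hc' : (c == '"') = false := by simp [hc]
      simp only [List.foldl_cons, upperUqStep, hc', Bool.false_eq_true, if_false]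
      rw [ih]
      cases inq <;> simp [specUQ, hc', PySem.Chars.upper]

theorem portA_eq_spec (name : String) :
    upper_unquoted_identifier_py name = String.mk (specUQ false name.toList) := by
  show String.mk (PySem.Chars.join []
      ((name.toList.foldl upperUqStep ([], false, [])).1 ++
        [if (name.toList.foldl upperUqStep ([], false, [])).2.1 then
            (name.toList.foldl upperUqStep ([], false, [])).2.2
         else PySem.Chars.upper (name.toList.foldl upperUqStep ([], false, [])).2.2]))
    = String.mk (specUQ false name.toList)
  rw [foldA_spec name.toList [] false []]
  simp [PySem.Chars.upper]

-- splitQ never returns []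
theorem splitQ_ne_nil (cs : List Char) : splitQ cs ≠ [] := by
  induction cs with
  | nil => simp [splitQ]
  | cons c cs ih =>
    simp only [splitQ]
    split
    · simp
    · cases h : splitQ cs with
      | nil => exact absurd h ih
      | cons p ps => simp [List.modifyHead]

-- PySem splitOn on a single '"' separator computes splitQ
theorem splitOn_go_spec (fuel : Nat) : ∀ (l cur : List Char) (acc : List (List Char)),
    l.length ≤ fuel →
    PySem.Chars.splitOn.go ['"'] fuel l cur acc
      = acc.reverse ++ (splitQ l).modifyHead (cur.reverse ++ ·) := by
  induction fuel with
  | zero =>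
    intro l cur acc h
    have : l = [] := by cases l <;> simp_all
    subst this
    simp [PySem.Chars.splitOn.go, splitQ, List.modifyHead]
  | succ n ih =>
    intro l cur acc h
    cases l with
    | nil => simp [PySem.Chars.splitOn.go, splitQ, List.modifyHead]
    | cons c rest =>
      by_cases hc : c = '"'
      · subst hc
        have hpre : List.isPrefixOf ['"'] ('"' :: rest) = true := by
          simp [List.isPrefixOf]
        rw [PySem.Chars.splitOn.go]
        simp only [hpre, if_true, List.length_cons, List.length_nil, List.drop_succ_cons,
          List.drop_nil, List.drop_zero]
        rw [ih rest [] (cur.reverse :: acc) (by simpa using Nat.le_of_succ_le_succ h)]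
        simp only [splitQ, if_pos rfl, List.modifyHead, beq_self_eq_true, if_true]
        cases splitQ rest <;> simp
      · have hpre : List.isPrefixOf ['"'] (c :: rest) = false := by
          simp only [List.isPrefixOf, Bool.and_eq_false_iff, beq_eq_false_iff_ne, ne_eq]
          exact Or.inl (fun h => hc h.symm)
        rw [PySem.Chars.splitOn.go]
        simp only [hpre, Bool.false_eq_true, if_false]
        rw [ih rest (c :: cur) acc (by simpa using Nat.le_of_succ_le_succ h)]
        have hc' : (c == '"') = false := by simp [hc]
        simp only [splitQ, hc', Bool.false_eq_true, if_false]
        cases hsp : splitQ rest with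
        | nil => exact absurd hsp (splitQ_ne_nil rest)
        | cons p ps => simp [List.modifyHead]

theorem splitOn_eq_splitQ (cs : List Char) :
    PySem.Chars.splitOn cs ['"'] = splitQ cs := by
  have := splitOn_go_spec (cs.length + 1) cs [] [] (by omega)
  rw [PySem.Chars.splitOn, this]
  cases h : splitQ cs with
  | nil => exact absurd h (splitQ_ne_nil cs)
  | cons p ps => simp [List.modifyHead]

-- the enumerate-parity map is altUQ
theorem enumMap_eq_altUQ (ps : List (List Char)) : ∀ (k : Int), 0 ≤ k →
    (PySem.List.enumerate ps k).map
      (fun ip => if ip.1 % 2 == 0 then PySem.Chars.upper ip.2 else ip.2)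
    = altUQ (k % 2 == 0) ps := by
  induction ps with
  | nil => intro k hk; simp [PySem.List.enumerate, altUQ]
  | cons p ps ih =>
    intro k hk
    rw [PySem.List.enumerate_cons]
    simp only [List.map_cons, altUQ]
    rw [ih (k + 1) (by omega)]
    have h2 : ((k + 1) % 2 == 0) = !(k % 2 == 0) := by
      have h0 : k % 2 = 0 ∨ k % 2 = 1 := by omega
      rcases h0 with h0 | h0 <;> simp [h0, Int.add_emod]
    rw [h2]

-- join of the alternate-uppered parts is specUQ
theorem join_altUQ_splitQ (cs : List Char) : ∀ (b : Bool),
    PySem.Chars.join ['"'] (altUQ b (splitQ cs)) = specUQ (!b) cs := by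
  induction cs with
  | nil =>
    intro b
    cases b <;> simp [splitQ, altUQ, specUQ, PySem.Chars.join_singleton, PySem.Chars.upper]
  | cons c cs ih =>
    intro b
    by_cases hc : c = '"'
    · subst hc
      have hs : splitQ ('"' :: cs) = [] :: splitQ cs := by simp [splitQ]
      rw [hs]
      simp only [altUQ]
      cases hsp : splitQ cs with
      | nil => exact absurd hsp (splitQ_ne_nil cs)
      | cons p ps =>
        rw [← hsp]
        have hne : altUQ (!b) (splitQ cs) ≠ [] := by
          rw [hsp]; simp [altUQ]
        cases haq : altUQ (!b) (splitQ cs) with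
        | nil => exact absurd haq hne
        | cons q qs =>
          rw [PySem.Chars.join_cons_cons, ← haq, ih (!b)]
          cases b <;> simp [specUQ, PySem.Chars.upper]
    · have hc' : (c == '"') = false := by simp [hc]
      simp only [splitQ, hc', Bool.false_eq_true, if_false]
      cases hsp : splitQ cs with
      | nil => exact absurd hsp (splitQ_ne_nil cs)
      | cons p ps =>
        have key : PySem.Chars.join ['"'] (altUQ b ((p :: ps).modifyHead (c :: ·)))
            = (if b then PySem.Chars.upperChar c else c)
              :: PySem.Chars.join ['"'] (altUQ b (p :: ps)) := by
          cases ps with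
          | nil =>
            cases b <;>
              simp [List.modifyHead, altUQ, PySem.Chars.join_singleton, PySem.Chars.upper]
          | cons q qs =>
            cases b <;>
              simp [List.modifyHead, altUQ, PySem.Chars.join_cons_cons, PySem.Chars.upper]
        rw [key, ← hsp, ih b]
        cases b <;> simp [specUQ, hc']

theorem portB_eq_spec (name : String) :
    upper_unquoted_identifier_py_alt name = String.mk (specUQ false name.toList) := by
  unfold upper_unquoted_identifier_py_alt
  rw [splitOn_eq_splitQ, enumMap_eq_altUQ _ 0 (by omega)]
  norm_num
  rw [join_altUQ_splitQ name.toList true]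
  rfl

-- ===== VERDICT (by name: the statement is the Claim_ definition above) =====
theorem upper_unquoted_identifier_py_spec : Claim_equal_upper_unquoted_identifier_py := by
  intro name _
  unfold Spec_upper_unquoted_identifier_py
  rw [portA_eq_spec, portB_eq_spec]
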